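-- pv_equiv track=rewrite | github.com/aidenHOfficial/Chaos-Encryption | chaos-encryption/test.py | get_binary_from_positions
-- ===== SOURCE A (Python) =====
-- def get_binary_from_positions(position, alive_cells, radius):
--     length = ((2 * radius) + 1)
--
--     binary_string = ""
--
--     starting_row = position[0] - 1
--     starting_col = position[1] + 1
--
--     for col in range(starting_col, starting_col - length, -1):
--         for row in range(starting_row, starting_row + length):
--             if ((row, col) in alive_cells):
--                 binary_string += "1"
--             else:
--                 binary_string += "0"
--
--     return binary_string
-- ===== SOURCE B (Python) =====
-- def get_binary_from_positions(position, alive_cells, radius):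
--     length = (2 * radius) + 1
--     if length <= 0:
--         return ""
--
--     starting_row = position[0] - 1
--     starting_col = position[1] + 1
--
--     out = ["0"] * (length * length)
--     for (row, col) in alive_cells:
--         ci = starting_col - col
--         ri = row - starting_row
--         if 0 <= ci < length and 0 <= ri < length:
--             out[ci * length + ri] = "1"
--     return "".join(out)
-- ===== Notes on version B (the rewrite author's own statement) =====
-- stated objective: faster
-- what changed: Instead of scanning alive_cells for every cell of the (2r+1)x(2r+1) window, B preallocates a '0' buffer of length*length and makes one pass over alive_cells, writing '1' at the flat index of each cell that falls inside the window.
import Mathlib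
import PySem

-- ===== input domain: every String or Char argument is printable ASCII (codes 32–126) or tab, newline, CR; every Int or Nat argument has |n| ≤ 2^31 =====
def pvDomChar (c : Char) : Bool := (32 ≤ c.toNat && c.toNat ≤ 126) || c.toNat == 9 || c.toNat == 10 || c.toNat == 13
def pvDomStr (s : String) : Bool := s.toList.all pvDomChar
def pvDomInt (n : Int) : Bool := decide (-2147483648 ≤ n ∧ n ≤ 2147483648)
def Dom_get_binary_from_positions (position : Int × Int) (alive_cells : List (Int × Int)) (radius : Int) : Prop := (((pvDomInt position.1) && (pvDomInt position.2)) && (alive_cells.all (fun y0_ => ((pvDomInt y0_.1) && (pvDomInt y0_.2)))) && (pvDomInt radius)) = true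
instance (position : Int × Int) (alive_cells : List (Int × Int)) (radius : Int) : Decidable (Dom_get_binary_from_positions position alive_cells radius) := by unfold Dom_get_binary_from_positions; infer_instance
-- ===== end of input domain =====

-- B replaces A's per-window-cell membership scans with a single pass over alive_cells
-- that writes '1' into a preallocated '0' buffer (objective: faster).

-- ===== PORT A =====
def get_binary_from_positions (position : Int × Int) (alive_cells : List (Int × Int)) (radius : Int) : String :=
  let length : Int := (2 * radius) + 1
  let binary_string : String := ""
  let starting_row : Int := position.1 - 1
  let starting_col : Int := position.2 + 1
  (PySem.List.pyRange starting_col (starting_col - length) (-1)).foldl (fun bs col =>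
    (PySem.List.pyRange starting_row (starting_row + length) 1).foldl (fun bs row =>
      if (row, col) ∈ alive_cells then bs ++ "1" else bs ++ "0") bs) binary_string

-- ===== PORT B =====
def get_binary_from_positions_alt (position : Int × Int) (alive_cells : List (Int × Int)) (radius : Int) : String :=
  let length : Int := (2 * radius) + 1
  if length ≤ 0 then "" else
  let starting_row : Int := position.1 - 1
  let starting_col : Int := position.2 + 1
  let out : List Char := List.replicate (length.toNat * length.toNat) '0'
  let out := alive_cells.foldl (fun out rc =>
    let ci : Int := starting_col - rc.2
    let ri : Int := rc.1 - starting_row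
    if 0 ≤ ci ∧ ci < length ∧ 0 ≤ ri ∧ ri < length then
      out.set (ci * length + ri).toNat '1'
    else out) out
  String.ofList out

-- ===== PRECONDITION & SPEC =====
def Spec_get_binary_from_positions (position : Int × Int) (alive_cells : List (Int × Int)) (radius : Int) (out : String) : Prop := out = get_binary_from_positions_alt position alive_cells radius
instance (position : Int × Int) (alive_cells : List (Int × Int)) (radius : Int) (out : String) : Decidable (Spec_get_binary_from_positions position alive_cells radius out) := by unfold Spec_get_binary_from_positions; infer_instance

-- ===== CLAIM (what is proved, stated in full; the proofs are below) =====
def Claim_equal_get_binary_from_positions : Prop := ∀ (position : Int × Int) (alive_cells : List (Int × Int)) (radius : Int), Dom_get_binary_from_positions position alive_cells radius → Spec_get_binary_from_positions position alive_cells radius (get_binary_from_positions position alive_cells radius)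

-- ===== LEMMAS AND PROOFS =====

theorem pv_ite_append (c : Prop) [Decidable c] (bs a b : String) :
    (if c then bs ++ a else bs ++ b) = bs ++ (if c then a else b) := by split <;> rfl

theorem pv_foldl_str {α : Type} (l : List α) (g : α → String) (s : String) :
    l.foldl (fun acc x => acc ++ g x) s = s ++ String.ofList (l.flatMap (fun x => (g x).toList)) := by
  induction l generalizing s with
  | nil => apply String.toList_inj.mp; simp
  | cons c t ih =>
    rw [List.foldl_cons, ih]
    apply String.toList_inj.mp
    simp [String.toList_append]

theorem pv_flatMap_range_map {β : Type} (f : Nat → Nat → β) (n L : Nat) :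
    (List.range n).flatMap (fun i => (List.range L).map (f i)) =
    (List.range (n * L)).map (fun k => f (k / L) (k % L)) := by
  induction n with
  | zero => simp
  | succ n ih =>
    rw [List.range_succ, List.flatMap_append, ih, Nat.succ_mul, List.range_add, List.map_append]
    simp only [List.flatMap_cons, List.flatMap_nil, List.append_nil, List.map_map]
    congr 1
    apply List.map_congr_left
    intro j hj
    rcases Nat.eq_zero_or_pos L with hL | hL
    · simp [hL] at hj
    · have hjL : j < L := List.mem_range.mp hj
      simp only [Function.comp_apply]
      rw [Nat.add_comm (n*L) j, Nat.add_mul_div_right _ _ hL, Nat.add_mul_mod_self_right,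
        Nat.div_eq_of_lt hjL, Nat.mod_eq_of_lt hjL, Nat.zero_add]

-- A's column-major double loop, written as one map over the flat index k (col = k / L, row = k % L).
theorem pv_A_eq (position : Int × Int) (alive_cells : List (Int × Int)) (radius : Int) :
    get_binary_from_positions position alive_cells radius =
    String.ofList ((List.range ((2*radius+1).toNat * (2*radius+1).toNat)).map (fun k =>
      if (position.1 - 1 + ((k % (2*radius+1).toNat : Nat) : Int),
          position.2 + 1 - ((k / (2*radius+1).toNat : Nat) : Int)) ∈ alive_cells
      then '1' else '0')) := by
  unfold get_binary_from_positions
  dsimp only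
  rw [PySem.List.pyRange_neg_one, PySem.List.pyRange_one]
  have e2 : (position.2 + 1 - (position.2 + 1 - (2*radius+1))).toNat = (2*radius+1).toNat := by
    congr 1; ring
  have e3 : (position.1 - 1 + (2*radius+1) - (position.1 - 1)).toNat = (2*radius+1).toNat := by
    congr 1; ring
  rw [e2, e3]
  simp only [List.foldl_map, pv_ite_append, pv_foldl_str]
  apply String.toList_inj.mp
  simp only [String.toList_append, String.toList_ofList]
  show "".toList ++ _ = _
  rw [String.toList_empty, List.nil_append]
  have t1 : ("1" : String).toList = ['1'] := rfl
  have t0 : ("0" : String).toList = ['0'] := rfl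
  simp only [apply_ite String.toList, t1, t0, ← apply_ite (fun c => [c])]
  have sing : ∀ (l : List Nat) (g : Nat → Char), l.flatMap (fun x => [g x]) = l.map g := by
    intro l g; induction l with
    | nil => rfl
    | cons a t ih => simp [ih]
  simp only [sing]
  rw [pv_flatMap_range_map]

-- B's placement loop, characterised pointwise: cell k is '1' iff some alive cell maps to k.
theorem pv_foldl_set_getElem? {α : Type} (P : α → Prop) [DecidablePred P] (idx : α → Nat)
    (cells : List α) (buf : List Char) (k : Nat)
    (hP : ∀ x, P x → idx x < buf.length) :
    (cells.foldl (fun out x => if P x then out.set (idx x) '1' else out) buf)[k]? =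
      if (∃ x ∈ cells, P x ∧ idx x = k) then some '1' else buf[k]? := by
  induction cells generalizing buf with
  | nil => simp
  | cons c t ih =>
    have hlen : (if P c then buf.set (idx c) '1' else buf).length = buf.length := by
      split <;> simp
    rw [List.foldl_cons, ih _ (by intro x hx; rw [hlen]; exact hP x hx)]
    by_cases ht : ∃ x ∈ t, P x ∧ idx x = k
    · simp [ht]
    · by_cases hc : P c
      · by_cases hk : idx c = k
        · subst hk
          simp [ht, hc, List.getElem?_set_self (hP c hc)]
        · simp [ht, hc, hk, List.getElem?_set_ne hk]
      · simp [ht, hc]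

-- 'some alive cell maps to flat index k' ↔ 'the cell A probes at index k is alive'.
theorem pv_bridge (alive_cells : List (Int × Int)) (sr sc len : Int) (hlen : 0 < len) (k : Nat)
    (hk : k < len.toNat * len.toNat) :
    ((∃ rc ∈ alive_cells,
        (0 ≤ sc - rc.2 ∧ sc - rc.2 < len ∧ 0 ≤ rc.1 - sr ∧ rc.1 - sr < len) ∧
        ((sc - rc.2) * len + (rc.1 - sr)).toNat = k)
      ↔ (sr + ((k % len.toNat : Nat) : Int), sc - ((k / len.toNat : Nat) : Int)) ∈ alive_cells) := by
  have hL : 0 < len.toNat := by omega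
  have hcast : ((len.toNat : Int)) = len := Int.toNat_of_nonneg (by omega)
  constructor
  · rintro ⟨⟨row, col⟩, hmem, ⟨h1, h2, h3, h4⟩, hidx⟩
    set c : Nat := (sc - col).toNat with hc
    set r : Nat := (row - sr).toNat with hr
    have hcol : (c : Int) = sc - col := Int.toNat_of_nonneg h1
    have hrow : (r : Int) = row - sr := Int.toNat_of_nonneg h3
    have hcL : c < len.toNat := by omega
    have hrL : r < len.toNat := by omega
    have hidx' : c * len.toNat + r = k := by
      rw [← hidx]
      have : (sc - col) * len + (row - sr) = ((c * len.toNat + r : Nat) : Int) := by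
        push_cast [hcol, hrow, hcast]; ring
      rw [this, Int.toNat_natCast]
    have hmod : k % len.toNat = r := by
      rw [← hidx', Nat.mul_add_mod', Nat.mod_eq_of_lt hrL]
    have hdiv : k / len.toNat = c := by
      rw [← hidx', Nat.mul_comm, Nat.mul_add_div hL, Nat.div_eq_of_lt hrL, Nat.add_zero]
    rw [hmod, hdiv]
    have : sr + (r : Int) = row := by omega
    have h2' : sc - (c : Int) = col := by omega
    rw [this, h2']
    exact hmem
  · intro hmem
    refine ⟨_, hmem, ⟨?_, ?_, ?_, ?_⟩, ?_⟩ <;> simp only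
    · have h6 : (0:Int) ≤ ((k / len.toNat : Nat) : Int) := Int.natCast_nonneg _
      omega
    · have h5 : k / len.toNat < len.toNat := Nat.div_lt_of_lt_mul (by omega)
      have h6 : ((k / len.toNat : Nat) : Int) < len := by rw [← hcast]; exact_mod_cast h5
      omega
    · have h6 : (0:Int) ≤ ((k % len.toNat : Nat) : Int) := Int.natCast_nonneg _
      omega
    · have h5 : k % len.toNat < len.toNat := Nat.mod_lt _ hL
      have h6 : ((k % len.toNat : Nat) : Int) < len := by rw [← hcast]; exact_mod_cast h5
      omega
    · have e : sc - (sc - ((k / len.toNat : Nat) : Int)) = ((k / len.toNat : Nat) : Int) := by ring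
      have e2 : sr + ((k % len.toNat : Nat) : Int) - sr = ((k % len.toNat : Nat) : Int) := by ring
      rw [e, e2]
      have : ((k / len.toNat : Nat) : Int) * len + ((k % len.toNat : Nat) : Int)
          = ((k / len.toNat * len.toNat + k % len.toNat : Nat) : Int) := by
        push_cast [hcast]; ring
      rw [this, Int.toNat_natCast, Nat.div_add_mod']

theorem pv_main (position : Int × Int) (alive_cells : List (Int × Int)) (radius : Int) :
    get_binary_from_positions position alive_cells radius
      = get_binary_from_positions_alt position alive_cells radius := by
  by_cases h : (2 * radius + 1 : Int) ≤ 0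
  · have e : PySem.List.pyRange (position.2+1) ((position.2+1) - (2*radius+1)) (-1) = [] :=
      PySem.List.pyRange_neg_one_eq_nil (by omega)
    unfold get_binary_from_positions get_binary_from_positions_alt
    dsimp only
    rw [e, if_pos h]
    rfl
  · replace h : (0:Int) < 2 * radius + 1 := by omega
    rw [pv_A_eq]
    unfold get_binary_from_positions_alt
    dsimp only
    rw [if_neg (not_le.mpr h)]
    apply congrArg String.ofList
    have hcast : (((2*radius+1 : Int).toNat : Int)) = 2*radius+1 := Int.toNat_of_nonneg (by omega)
    apply List.ext_getElem?
    intro k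
    rw [pv_foldl_set_getElem?
      (fun rc => 0 ≤ position.2 + 1 - rc.2 ∧ position.2 + 1 - rc.2 < 2*radius+1
        ∧ 0 ≤ rc.1 - (position.1 - 1) ∧ rc.1 - (position.1 - 1) < 2*radius+1)
      (fun rc => ((position.2 + 1 - rc.2) * (2*radius+1) + (rc.1 - (position.1 - 1))).toNat)
      alive_cells _ k ?hP]
    case hP =>
      rintro rc ⟨h1, h2, h3, h4⟩
      rw [List.length_replicate]
      have h0 : 0 ≤ (position.2 + 1 - rc.2) * (2*radius+1) + (rc.1 - (position.1 - 1)) := by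
        have := mul_nonneg h1 (le_of_lt h)
        omega
      have hlt : (position.2 + 1 - rc.2) * (2*radius+1) + (rc.1 - (position.1 - 1))
          < (2*radius+1) * (2*radius+1) := by nlinarith
      zify
      rw [Int.toNat_of_nonneg h0]
      push_cast [hcast]
      linarith
    by_cases hk : k < (2*radius+1).toNat * (2*radius+1).toNat
    · rw [List.getElem?_map, List.getElem?_range hk, List.getElem?_replicate, if_pos hk,
        Option.map_some]
      have hbr := pv_bridge alive_cells (position.1-1) (position.2+1) (2*radius+1) h k hk
      by_cases hm : (position.1 - 1 + ((k % (2*radius+1).toNat : Nat) : Int),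
          position.2 + 1 - ((k / (2*radius+1).toNat : Nat) : Int)) ∈ alive_cells
      · rw [if_pos hm, if_pos (hbr.mpr hm)]
      · rw [if_neg hm, if_neg (fun hex => hm (hbr.mp hex))]
    · rw [List.getElem?_map, List.getElem?_eq_none (by simpa using hk), List.getElem?_replicate,
        if_neg hk, Option.map_none]
      rw [if_neg]
      rintro ⟨rc, hmem, ⟨h1, h2, h3, h4⟩, hidx⟩
      apply hk
      rw [← hidx]
      have h0 : 0 ≤ (position.2 + 1 - rc.2) * (2*radius+1) + (rc.1 - (position.1 - 1)) := by
        have := mul_nonneg h1 (le_of_lt h)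
        omega
      have hlt : (position.2 + 1 - rc.2) * (2*radius+1) + (rc.1 - (position.1 - 1))
          < (2*radius+1) * (2*radius+1) := by nlinarith
      zify
      rw [Int.toNat_of_nonneg h0]
      push_cast [hcast]
      linarith

-- ===== VERDICT (by name: the statement is the Claim_ definition above) =====
theorem get_binary_from_positions_spec : Claim_equal_get_binary_from_positions := by
  intro position alive_cells radius _
  unfold Spec_get_binary_from_positions
  exact pv_main position alive_cells radius
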